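-- pv_equiv track=rewrite | github.com/SasakiPeter/AtCoder | ABC/C/099/main.py | getSix
-- ===== SOURCE A (Python) =====
-- def getSix(n):
--     val = 0
--     for p in range(1, n):
--         tmp = 6**p
--         if tmp <= n:
--             val = tmp
--         else:
--             break
--     return val
-- ===== SOURCE B (Python) =====
-- def getSix(n):
--     if n < 6:
--         return 0
--     r = getSix(n // 6)
--     return 6 * r if r else 6
-- ===== Notes on version B (the rewrite author's own statement) =====
-- stated objective: alternative
-- what changed: Replaces A's iterative scan over exponents p=1,2,... recomputing 6**p until it exceeds n by a divide-and-conquer recursion on n itself: the largest power of 6 <= n is 6 times the largest power of 6 <= n//6 (or 6 itself when that recursive answer is 0), with base case 0 for n < 6.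
import Mathlib
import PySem

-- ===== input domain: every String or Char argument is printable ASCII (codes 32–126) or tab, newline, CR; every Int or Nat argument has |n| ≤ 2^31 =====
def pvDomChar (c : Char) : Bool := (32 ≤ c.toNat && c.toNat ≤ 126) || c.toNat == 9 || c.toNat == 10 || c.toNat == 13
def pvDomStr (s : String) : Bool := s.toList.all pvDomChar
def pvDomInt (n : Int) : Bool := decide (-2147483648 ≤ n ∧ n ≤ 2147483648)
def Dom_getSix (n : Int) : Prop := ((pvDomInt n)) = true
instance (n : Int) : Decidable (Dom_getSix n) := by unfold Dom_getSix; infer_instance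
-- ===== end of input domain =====

-- B replaces A's exponent scan (recompute 6**p, stop past n) by a recursion on n // 6 (alternative algorithm).

-- ===== PORT A =====
-- for p in range(1, n): tmp = 6**p; stop (break) as soon as tmp > n
def getSixLoopA (n : Int) : List Int → Int → Int
  | [], val => val
  | p :: ps, val =>
      -- 6**p: every p drawn from range(1, n) satisfies p ≥ 1, so Int exponent = Nat exponent (exact)
      let tmp : Int := 6 ^ p.toNat
      if tmp ≤ n then getSixLoopA n ps tmp else val

def getSix (n : Int) : Int := getSixLoopA n (PySem.List.pyRange 1 n 1) 0

-- ===== PORT B =====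
-- if n < 6: return 0;  r = getSix(n // 6);  return 6 * r if r else 6
def getSix_alt (n : Int) : Int :=
  if n < 6 then 0
  else
    let r := getSix_alt (PySem.Int.floordiv n 6)
    if r = 0 then 6 else 6 * r
termination_by n.toNat
decreasing_by
  simp only [PySem.Int.floordiv_eq_ediv_of_pos (by norm_num : (0:Int) < 6)]
  omega

-- ===== PRECONDITION & SPEC =====
def Spec_getSix (n : Int) (out : Int) : Prop := out = getSix_alt n
instance (n : Int) (out : Int) : Decidable (Spec_getSix n out) := by unfold Spec_getSix; infer_instance

-- ===== CLAIM (what is proved, stated in full; the proofs are below) =====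
def Claim_equal_getSix : Prop := ∀ (n : Int), Dom_getSix n → Spec_getSix n (getSix n)

-- ===== LEMMAS AND PROOFS =====

-- proof-only reference function: the answer both programs compute
def pvS (n : Int) : Int := if 6 ≤ n then (6:Int) ^ (Nat.log 6 n.toNat) else 0

theorem pv_lt_pow (p : Nat) : (p : Int) + 1 < 6 ^ p ∨ p = 0 := by
  induction p with
  | zero => right; rfl
  | succ k ih =>
      left
      have h6 : (1:Int) ≤ 6 ^ k := one_le_pow₀ (by norm_num)
      rcases ih with h | h
      · push_cast
        calc (k:Int) + 1 + 1 < 6 ^ k + 6 ^ k := by omega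
          _ ≤ 6 ^ k * 6 := by nlinarith
          _ = 6 ^ (k + 1) := by ring
      · subst h; norm_num

theorem pv_pow_gt (p : Nat) (hp : 1 ≤ p) : (p : Int) + 1 < 6 ^ p := by
  rcases pv_lt_pow p with h | h
  · exact h
  · omega

-- cast bridge: (6:Int)^p ≤ n ↔ 6^p ≤ n.toNat (when 0 ≤ n)
theorem pv_pow_le_iff (p : Nat) (n : Int) (hn : 0 ≤ n) :
    (6:Int) ^ p ≤ n ↔ 6 ^ p ≤ n.toNat := by
  rw [show ((6:Int) ^ p) = ((6 ^ p : Nat) : Int) by push_cast; ring]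
  omega

-- A's loop from exponent p (p ≥ 1) returns the top power when 6^p still fits, else its accumulator
theorem pvA_loop (n : Int) (k : Nat) :
    ∀ (p : Nat) (v : Int), 1 ≤ p → (n - (p : Int)).toNat ≤ k →
      getSixLoopA n (PySem.List.pyRange (p : Int) n 1) v =
        if (6:Int) ^ p ≤ n then 6 ^ (Nat.log 6 n.toNat) else v := by
  induction k with
  | zero =>
      intro p v hp hk
      have hpn : n ≤ (p : Int) := by omega
      have hnot : ¬ (6:Int) ^ p ≤ n := by
        have := pv_pow_gt p hp; omega
      rw [PySem.List.pyRange_one_eq_nil hpn, getSixLoopA]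
      simp [hnot]
  | succ k ih =>
      intro p v hp hk
      by_cases hpn : (p : Int) < n
      · rw [PySem.List.pyRange_one_cons hpn, getSixLoopA]
        simp only [Int.toNat_natCast]
        by_cases hle : (6:Int) ^ p ≤ n
        · simp only [hle, if_pos]
          have hcast : ((p : Int) + 1) = ((p + 1 : Nat) : Int) := by push_cast; ring
          rw [hcast, ih (p + 1) (6 ^ p) (by omega) (by push_cast; omega)]
          by_cases h2 : (6:Int) ^ (p + 1) ≤ n
          · simp [h2]
          · -- loop stopped at p: 6^p ≤ n < 6^(p+1), so p is the log
            have hn0 : (0:Int) ≤ n := le_trans (by positivity) hle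
            have h1 : 6 ^ p ≤ n.toNat := (pv_pow_le_iff p n hn0).mp hle
            have h2' : n.toNat < 6 ^ (p + 1) := by
              have := (pv_pow_le_iff (p + 1) n hn0); omega
            have hlog := Nat.log_eq_of_pow_le_of_lt_pow h1 h2'
            simp [h2, hlog]
        · simp [hle]
      · have hpn' : n ≤ (p : Int) := by omega
        have hnot : ¬ (6:Int) ^ p ≤ n := by
          have := pv_pow_gt p hp; omega
        rw [PySem.List.pyRange_one_eq_nil hpn', getSixLoopA]
        simp [hnot]

theorem pvA_eq_S (n : Int) : getSix n = pvS n := by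
  unfold getSix pvS
  have h := pvA_loop n (n - 1).toNat 1 0 (le_refl 1) (by omega)
  simp only [Nat.cast_one] at h
  rw [h]
  norm_num

theorem pvB_eq_S_aux (k : Nat) : ∀ (n : Int), n.toNat ≤ k → getSix_alt n = pvS n := by
  induction k with
  | zero =>
      intro n hn
      rw [getSix_alt]
      have h6 : n < 6 := by omega
      simp [h6, pvS, show ¬ (6:Int) ≤ n by omega]
  | succ k ih =>
      intro n hn
      rw [getSix_alt]
      by_cases h6 : n < 6
      · simp [h6, pvS, show ¬ (6:Int) ≤ n by omega]
      · simp only [h6, if_neg, not_false_iff]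
        have hpos : (0:Int) < 6 := by norm_num
        rw [PySem.Int.floordiv_eq_ediv_of_pos hpos]
        have hfuel : (n / 6).toNat ≤ k := by omega
        rw [ih (n / 6) hfuel]
        have hmt : (n / 6).toNat = n.toNat / 6 := by omega
        by_cases hm : n / 6 < 6
        · -- 6 ≤ n < 36: recursive answer is 0, result is 6 = 6^1
          have hS : pvS (n / 6) = 0 := by
            simp [pvS, show ¬ (6:Int) ≤ n / 6 by omega]
          rw [hS]
          have hlog : Nat.log 6 n.toNat = 1 :=
            Nat.log_eq_of_pow_le_of_lt_pow (by omega) (by omega)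
          simp [pvS, show (6:Int) ≤ n by omega, hlog]
        · -- n ≥ 36: recursive answer is the top power below n/6; multiply by 6
          have hS : pvS (n / 6) = 6 ^ (Nat.log 6 ((n / 6).toNat)) := by
            simp [pvS, show (6:Int) ≤ n / 6 by omega]
          have hne : (6:Int) ^ (Nat.log 6 ((n / 6).toNat)) ≠ 0 := by positivity
          rw [hS]
          simp only [hne, if_neg, not_false_iff]
          have hlogpos : 0 < Nat.log 6 n.toNat :=
            Nat.log_pos (by norm_num) (by omega)
          have hld : Nat.log 6 (n.toNat / 6) = Nat.log 6 n.toNat - 1 :=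
            Nat.log_div_base 6 n.toNat
          have : Nat.log 6 ((n / 6).toNat) + 1 = Nat.log 6 n.toNat := by
            rw [hmt, hld]; omega
          rw [pvS, if_pos (show (6:Int) ≤ n by omega), ← this, pow_succ]
          ring

theorem pvB_eq_S (n : Int) : getSix_alt n = pvS n :=
  pvB_eq_S_aux n.toNat n (le_refl _)

-- ===== VERDICT (by name: the statement is the Claim_ definition above) =====
theorem getSix_spec : Claim_equal_getSix := by
  intro n _
  unfold Spec_getSix
  rw [pvA_eq_S, pvB_eq_S]
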